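-- pv_equiv track=rewrite | github.com/aasirotkin/checkio | uselessflight.py | useless_flight
-- ===== SOURCE A (Python) =====
-- from typing import List, Dict, Tuple
--
-- def find_lower_cost(graph: Dict, data: Tuple):
--     dist = {a: data[2] for a in graph}
--     visited = {a: False for a in graph}
--     dist[data[0]] = 0
--
--     while True:
--         u = ''
--         sd = data[2]
--         for c, v in visited.items():
--             if not v and dist[c] < sd:
--                 sd = dist[c]
--                 u = c
--         if not u: break
--         visited[u] = True
--
--         for g in graph:
--             v = u
--             w = data[2]
--             for r in graph[u]:
--                 if g in r:
--                     v, w = r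
--                     break
--             if v == u: continue
--
--             newLen = dist[u] + w
--             if newLen < dist[v]:
--                 dist[v] = newLen
--
--     del visited
--     return dist[data[1]]
--
-- def useless_flight(schedule: List) -> List:
--     graph = {}
--     for sc in schedule:
--         if sc[0] not in graph: graph[sc[0]] = []
--         if sc[1] not in graph: graph[sc[1]] = []
--
--         graph[sc[0]].append((sc[1], sc[2]))
--         graph[sc[1]].append((sc[0], sc[2]))
--
--     return [i for i, sc in enumerate(schedule)
--             if find_lower_cost(graph, sc) < sc[2]]
-- ===== SOURCE B (Python) =====
-- from typing import List
--
-- def useless_flight(schedule: List) -> List: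
--     # first-edge adjacency: adj[u][v] = weight of the FIRST schedule edge joining u and v
--     adj = {}
--     for a, b, w in schedule:
--         if a not in adj: adj[a] = {}
--         if b not in adj: adj[b] = {}
--         if a != b:
--             adj[a].setdefault(b, w)
--             adj[b].setdefault(a, w)
--     nodes = list(adj)
--
--     def cheaper(a, b, cap):
--         # Dijkstra from a capped at cap: is some path a->b cheaper than cap?
--         dist = {x: cap for x in nodes}
--         dist[a] = 0
--         rem = list(nodes)
--         while True:
--             u, sd = '', cap
--             for c in rem:
--                 if dist[c] < sd:
--                     u, sd = c, dist[c]
--             if not u: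
--                 break
--             rem = [c for c in rem if c != u]
--             du = dist[u]
--             for v, w in adj[u].items():
--                 if du + w < dist[v]:
--                     dist[v] = du + w
--         return dist[b] < cap
--
--     cache = {}
--     out = []
--     for i, sc in enumerate(schedule):
--         key = (sc[0], sc[1], sc[2])
--         if key not in cache:
--             cache[key] = cheaper(sc[0], sc[1], sc[2])
--         if cache[key]:
--             out.append(i)
--     return out
-- ===== Notes on version B (the rewrite author's own statement) =====
-- stated objective: faster
-- what changed: A re-runs, for every visited node of every per-edge search, a scan over ALL graph nodes each rescanning the node's whole incidence list to find the connecting edge, and recomputes the search for duplicate edges; B precomputes once a first-edge-per-neighbor nested dict so each visit relaxes only the node's actual neighbors by direct lookup, keeps the unvisited frontier as a shrinking list, and memoizes the per-edge capped-search answer by its (src,dst,cost) triple.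
import Mathlib
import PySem

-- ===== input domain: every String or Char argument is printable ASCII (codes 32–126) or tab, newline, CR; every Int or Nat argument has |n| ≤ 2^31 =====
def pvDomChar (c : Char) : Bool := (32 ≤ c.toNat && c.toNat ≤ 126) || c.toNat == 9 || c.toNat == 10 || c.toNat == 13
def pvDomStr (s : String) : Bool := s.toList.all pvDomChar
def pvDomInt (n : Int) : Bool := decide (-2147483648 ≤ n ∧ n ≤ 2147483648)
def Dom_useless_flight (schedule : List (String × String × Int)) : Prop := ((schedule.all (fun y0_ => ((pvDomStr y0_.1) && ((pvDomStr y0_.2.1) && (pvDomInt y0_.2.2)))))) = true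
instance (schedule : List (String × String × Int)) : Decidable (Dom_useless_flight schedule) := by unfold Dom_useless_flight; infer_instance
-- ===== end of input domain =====

-- B replaces A's per-visit scan over all nodes × incidence lists by a first-edge-per-neighbor
-- adjacency dict built once, a shrinking unvisited list, and a per-(src,dst,cost) memo (faster).


-- ===== PORT A =====
-- `for r in graph[u]: if g in r: v, w = r; break` — tuple membership: r = (city, cost) with
-- cost an Int, so the String g can only equal the first component; exact on these types.
def pvFirstMatchA (g : String) : List (String × Int) → Option (String × Int)
  | [] => none
  | r :: t => if g = r.1 then some r else pvFirstMatchA g t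

-- the `for c, v in visited.items()` selection scan (u = '' is the not-found sentinel)
def pvSelectA (dist : PySem.Dict String Int) (cap : Int) (items : List (String × Bool)) : String × Int :=
  items.foldl (fun p cv =>
    if cv.2 = false ∧ dist.getD cv.1 0 < p.2 then (cv.1, dist.getD cv.1 0) else p) ("", cap)

-- the `for g in graph:` relaxation pass (dist[c] lookups use getD: every looked-up key is present)
def pvRelaxA (graph : PySem.Dict String (List (String × Int))) (u : String) (cap : Int)
    (dist : PySem.Dict String Int) : PySem.Dict String Int :=
  graph.keys.foldl (fun dist g =>
    let vw := (pvFirstMatchA g (graph.getD u [])).getD (u, cap)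
    if vw.1 = u then dist
    else
      let newLen := dist.getD u 0 + vw.2
      if newLen < dist.getD vw.1 0 then dist.insert vw.1 newLen else dist) dist

-- the `while True:` loop; fuel keys.length+1 always suffices (each round marks a fresh node visited)
def pvLoopA (graph : PySem.Dict String (List (String × Int))) (cap : Int) :
    Nat → PySem.Dict String Int → PySem.Dict String Bool → PySem.Dict String Int
  | 0, dist, _ => dist
  | fuel + 1, dist, visited =>
    let p := pvSelectA dist cap visited.items
    if p.1 = "" then dist
    else pvLoopA graph cap fuel (pvRelaxA graph p.1 cap dist) (visited.insert p.1 true)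

def find_lower_cost (graph : PySem.Dict String (List (String × Int))) (data : String × String × Int) : Int :=
  let dist := graph.keys.foldl (fun d a => d.insert a data.2.2) PySem.Dict.empty
  let visited := graph.keys.foldl (fun d a => d.insert a false) PySem.Dict.empty
  let dist := dist.insert data.1 0
  let dist := pvLoopA graph data.2.2 (graph.keys.length + 1) dist visited
  dist.getD data.2.1 0

def useless_flight (schedule : List (String × String × Int)) : List Int :=
  let graph := schedule.foldl (fun g sc =>
    let g := if g.contains sc.1 then g else g.insert sc.1 []
    let g := if g.contains sc.2.1 then g else g.insert sc.2.1 []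
    let g := g.modify sc.1 [] (· ++ [(sc.2.1, sc.2.2)])
    g.modify sc.2.1 [] (· ++ [(sc.1, sc.2.2)])) PySem.Dict.empty
  ((PySem.List.enumerate schedule 0).filter
    (fun p => decide (find_lower_cost graph p.2 < p.2.2.2))).map (·.1)

-- ===== PORT B =====
def pvAdjB (schedule : List (String × String × Int)) : PySem.Dict String (PySem.Dict String Int) :=
  schedule.foldl (fun ad sc =>
    let ad := if ad.contains sc.1 then ad else ad.insert sc.1 PySem.Dict.empty
    let ad := if ad.contains sc.2.1 then ad else ad.insert sc.2.1 PySem.Dict.empty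
    if sc.1 = sc.2.1 then ad
    else
      let ad := ad.modify sc.1 PySem.Dict.empty (fun d => d.setdefault sc.2.1 sc.2.2)
      ad.modify sc.2.1 PySem.Dict.empty (fun d => d.setdefault sc.1 sc.2.2)) PySem.Dict.empty

def pvSelectB (dist : PySem.Dict String Int) (cap : Int) (rem : List String) : String × Int :=
  rem.foldl (fun p c => if dist.getD c 0 < p.2 then (c, dist.getD c 0) else p) ("", cap)

def pvLoopB (adj : PySem.Dict String (PySem.Dict String Int)) (cap : Int) :
    Nat → PySem.Dict String Int → List String → PySem.Dict String Int
  | 0, dist, _ => dist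
  | fuel + 1, dist, rem =>
    let p := pvSelectB dist cap rem
    if p.1 = "" then dist
    else
      let rem' := rem.filter (fun c => c ≠ p.1)
      let du := dist.getD p.1 0
      let dist' := (adj.getD p.1 PySem.Dict.empty).items.foldl (fun dist vw =>
        if du + vw.2 < dist.getD vw.1 0 then dist.insert vw.1 (du + vw.2) else dist) dist
      pvLoopB adj cap fuel dist' rem'

def pvCheaperB (adj : PySem.Dict String (PySem.Dict String Int)) (nodes : List String)
    (a b : String) (cap : Int) : Bool :=
  let dist := nodes.foldl (fun d x => d.insert x cap) PySem.Dict.empty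
  let dist := dist.insert a 0
  decide ((pvLoopB adj cap (nodes.length + 1) dist nodes).getD b 0 < cap)

def useless_flight_alt (schedule : List (String × String × Int)) : List Int :=
  let adj := pvAdjB schedule
  let nodes := adj.keys
  ((PySem.List.enumerate schedule 0).foldl
    (fun (st : PySem.Dict (String × String × Int) Bool × List Int) p =>
      let cache := if st.1.contains p.2 then st.1
        else st.1.insert p.2 (pvCheaperB adj nodes p.2.1 p.2.2.1 p.2.2.2)
      (cache, if cache.getD p.2 false then st.2 ++ [p.1] else st.2))
    (PySem.Dict.empty, [])).2

-- ===== PRECONDITION & SPEC =====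
-- A is total (no Pre_): both programs return on every well-typed schedule.
def Spec_useless_flight (schedule : List (String × String × Int)) (out : List Int) : Prop :=
  out = useless_flight_alt schedule
instance (schedule : List (String × String × Int)) (out : List Int) :
    Decidable (Spec_useless_flight schedule out) := by unfold Spec_useless_flight; infer_instance

-- ===== CLAIM =====
def Claim_equal_useless_flight : Prop :=
  ∀ (schedule : List (String × String × Int)), Dom_useless_flight schedule →
    Spec_useless_flight schedule (useless_flight schedule)

-- ===== LEMMAS AND PROOFS =====

-- abbreviations for the two build steps (definitionally the lambdas inside the ports)
def pvStepA (g : PySem.Dict String (List (String × Int))) (sc : String × String × Int) :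
    PySem.Dict String (List (String × Int)) :=
  let g := if g.contains sc.1 then g else g.insert sc.1 []
  let g := if g.contains sc.2.1 then g else g.insert sc.2.1 []
  let g := g.modify sc.1 [] (· ++ [(sc.2.1, sc.2.2)])
  g.modify sc.2.1 [] (· ++ [(sc.1, sc.2.2)])

def pvStepB (ad : PySem.Dict String (PySem.Dict String Int)) (sc : String × String × Int) :
    PySem.Dict String (PySem.Dict String Int) :=
  let ad := if ad.contains sc.1 then ad else ad.insert sc.1 PySem.Dict.empty
  let ad := if ad.contains sc.2.1 then ad else ad.insert sc.2.1 PySem.Dict.empty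
  if sc.1 = sc.2.1 then ad
  else
    let ad := ad.modify sc.1 PySem.Dict.empty (fun d => d.setdefault sc.2.1 sc.2.2)
    ad.modify sc.2.1 PySem.Dict.empty (fun d => d.setdefault sc.1 sc.2.2)

lemma pvUF_eq (schedule : List (String × String × Int)) :
    useless_flight schedule =
      ((PySem.List.enumerate schedule 0).filter
        (fun p => decide (find_lower_cost (schedule.foldl pvStepA PySem.Dict.empty) p.2 < p.2.2.2))).map (·.1) := rfl

-- ===== small plumbing =====
lemma pvEnsure_getD {ν : Type} (d : PySem.Dict String ν) (a x : String) (v : ν) :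
    (if d.contains a then d else d.insert a v).getD x v = d.getD x v := by
  split_ifs with h
  · rfl
  · rw [PySem.Dict.getD_insert]
    split_ifs with hx
    · subst hx; rw [PySem.Dict.getD_of_not_contains _ _ (by simpa using h)]
    · rfl

lemma pvEnsure_keys {ν : Type} (d : PySem.Dict String ν) (a : String) (v : ν) :
    (if d.contains a then d else d.insert a v).keys = PySem.Set.add d.keys a := by
  rw [PySem.Set.add_eq_ite]
  by_cases h : d.contains a
  · simp [h, (PySem.Dict.contains_iff_mem_keys d a).mp h]
  · have h' : d.contains a = false := by simpa using h
    have hm : a ∉ d.keys := fun hm => by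
      rw [(PySem.Dict.contains_iff_mem_keys d a).mpr hm] at h'; cases h'
    simp [h, hm, PySem.Dict.keys_insert_of_not_contains d v h']

lemma pvContains_of_mem {ν : Type} (d : PySem.Dict String ν) (a : String) (h : a ∈ d.keys) :
    d.contains a = true := (PySem.Dict.contains_iff_mem_keys d a).mpr h

lemma pvFirstMatchA_append (x : String) (l l' : List (String × Int)) :
    pvFirstMatchA x (l ++ l') =
      (match pvFirstMatchA x l with
       | some r => some r
       | none => pvFirstMatchA x l') := by
  induction l with
  | nil => simp [pvFirstMatchA]
  | cons r t ih =>
      by_cases h : x = r.1 <;> simp [pvFirstMatchA, h, ih]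

lemma pvFirstMatchA_fst (x : String) (l : List (String × Int)) (r : String × Int)
    (h : pvFirstMatchA x l = some r) : r.1 = x := by
  induction l with
  | nil => simp [pvFirstMatchA] at h
  | cons p t ih =>
      by_cases hx : x = p.1
      · simp [pvFirstMatchA, hx] at h; subst h; exact hx.symm
      · simp [pvFirstMatchA, hx] at h; exact ih h

-- ===== build-step effects =====
lemma pvStepA_getD (g : PySem.Dict String (List (String × Int))) (sc : String × String × Int) (u : String) :
    (pvStepA g sc).getD u [] =
      if sc.1 = sc.2.1 then
        (if u = sc.1 then g.getD u [] ++ [(sc.2.1, sc.2.2)] ++ [(sc.1, sc.2.2)] else g.getD u [])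
      else if u = sc.1 then g.getD u [] ++ [(sc.2.1, sc.2.2)]
      else if u = sc.2.1 then g.getD u [] ++ [(sc.1, sc.2.2)]
      else g.getD u [] := by
  unfold pvStepA
  by_cases hab : sc.1 = sc.2.1 <;> by_cases h1 : u = sc.1 <;> by_cases h2 : u = sc.2.1 <;>
    simp_all [PySem.Dict.getD_modify, pvEnsure_getD]

lemma pvStepB_getD (ad : PySem.Dict String (PySem.Dict String Int)) (sc : String × String × Int) (u : String) :
    (pvStepB ad sc).getD u PySem.Dict.empty =
      if sc.1 = sc.2.1 then ad.getD u PySem.Dict.empty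
      else if u = sc.1 then (ad.getD u PySem.Dict.empty).setdefault sc.2.1 sc.2.2
      else if u = sc.2.1 then (ad.getD u PySem.Dict.empty).setdefault sc.1 sc.2.2
      else ad.getD u PySem.Dict.empty := by
  unfold pvStepB
  by_cases hab : sc.1 = sc.2.1 <;> by_cases h1 : u = sc.1 <;> by_cases h2 : u = sc.2.1 <;>
    simp_all [PySem.Dict.getD_modify, pvEnsure_getD]

lemma pvStepA_keys (g : PySem.Dict String (List (String × Int))) (sc : String × String × Int) :
    (pvStepA g sc).keys = PySem.Set.add (PySem.Set.add g.keys sc.1) sc.2.1 := by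
  unfold pvStepA
  have e1 := pvEnsure_keys g sc.1 ([] : List (String × Int))
  set g1 := if g.contains sc.1 then g else g.insert sc.1 [] with hg1
  have e2 := pvEnsure_keys g1 sc.2.1 ([] : List (String × Int))
  set g2 := if g1.contains sc.2.1 then g1 else g1.insert sc.2.1 [] with hg2
  have m1 : sc.1 ∈ g2.keys := by
    rw [e2, e1]; simp [PySem.Set.mem_add]
  have m2 : sc.2.1 ∈ g2.keys := by
    rw [e2]; simp [PySem.Set.mem_add]
  have k3 : (g2.modify sc.1 [] (· ++ [(sc.2.1, sc.2.2)])).keys = g2.keys := by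
    rw [PySem.Dict.keys_modify, PySem.Dict.keys_insert_of_contains _ _ (pvContains_of_mem _ _ m1)]
  have m2' : sc.2.1 ∈ (g2.modify sc.1 [] (· ++ [(sc.2.1, sc.2.2)])).keys := by rw [k3]; exact m2
  rw [PySem.Dict.keys_modify, PySem.Dict.keys_insert_of_contains _ _ (pvContains_of_mem _ _ m2'),
    k3, e2, e1]

lemma pvStepB_keys (ad : PySem.Dict String (PySem.Dict String Int)) (sc : String × String × Int) :
    (pvStepB ad sc).keys = PySem.Set.add (PySem.Set.add ad.keys sc.1) sc.2.1 := by
  unfold pvStepB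
  have e1 := pvEnsure_keys ad sc.1 (PySem.Dict.empty : PySem.Dict String Int)
  set a1 := if ad.contains sc.1 then ad else ad.insert sc.1 PySem.Dict.empty with ha1
  have e2 := pvEnsure_keys a1 sc.2.1 (PySem.Dict.empty : PySem.Dict String Int)
  set a2 := if a1.contains sc.2.1 then a1 else a1.insert sc.2.1 PySem.Dict.empty with ha2
  have m1 : sc.1 ∈ a2.keys := by rw [e2, e1]; simp [PySem.Set.mem_add]
  have m2 : sc.2.1 ∈ a2.keys := by rw [e2]; simp [PySem.Set.mem_add]
  by_cases hab : sc.1 = sc.2.1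
  · rw [if_pos hab, e2, e1]
  · rw [if_neg hab]
    have k3 : (a2.modify sc.1 PySem.Dict.empty (fun d => d.setdefault sc.2.1 sc.2.2)).keys = a2.keys := by
      rw [PySem.Dict.keys_modify, PySem.Dict.keys_insert_of_contains _ _ (pvContains_of_mem _ _ m1)]
    have m2' : sc.2.1 ∈ (a2.modify sc.1 PySem.Dict.empty (fun d => d.setdefault sc.2.1 sc.2.2)).keys := by
      rw [k3]; exact m2
    rw [PySem.Dict.keys_modify, PySem.Dict.keys_insert_of_contains _ _ (pvContains_of_mem _ _ m2'),
      k3, e2, e1]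

-- ===== the build invariant =====
def pvInv (g : PySem.Dict String (List (String × Int)))
    (ad : PySem.Dict String (PySem.Dict String Int)) : Prop :=
  g.keys = ad.keys ∧ ad.keys.Nodup ∧
  (∀ u, (ad.getD u PySem.Dict.empty).keys.Nodup) ∧
  (∀ u, u ∉ (ad.getD u PySem.Dict.empty).keys) ∧
  (∀ u x, x ∈ (ad.getD u PySem.Dict.empty).keys → x ∈ ad.keys) ∧
  (∀ u x, x ≠ u → (ad.getD u PySem.Dict.empty).get? x =
      (pvFirstMatchA x (g.getD u [])).map (·.2))

lemma pvInv_empty : pvInv PySem.Dict.empty PySem.Dict.empty := by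
  refine ⟨rfl, ?_, ?_, ?_, ?_, ?_⟩ <;>
    simp [PySem.Dict.keys_empty, PySem.Dict.getD_empty, PySem.Dict.get?_empty, pvFirstMatchA]

theorem pvInv_step (g : PySem.Dict String (List (String × Int)))
    (ad : PySem.Dict String (PySem.Dict String Int)) (sc : String × String × Int)
    (h : pvInv g ad) : pvInv (pvStepA g sc) (pvStepB ad sc) := by
  obtain ⟨c1, c2, c3, c4, c5, c6⟩ := h
  have kA := pvStepA_keys g sc
  have kB := pvStepB_keys ad sc
  refine ⟨by rw [kA, kB, c1], ?_, ?_, ?_, ?_, ?_⟩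
  · rw [kB]; exact PySem.Set.nodup_add _ _ (PySem.Set.nodup_add _ _ c2)
  · -- inner keys nodup
    intro u
    rw [pvStepB_getD]
    split_ifs with hab h1 h2
    · exact c3 u
    · rw [PySem.Dict.keys_setdefault]
      split_ifs with hc
      · exact c3 u
      · refine List.Nodup.append (c3 u) (List.nodup_singleton _) ?_
        intro x hx hx'
        simp at hx'
        subst hx'
        exact absurd (pvContains_of_mem _ _ hx) (by simp [hc])
    · rw [PySem.Dict.keys_setdefault]
      split_ifs with hc
      · exact c3 u
      · refine List.Nodup.append (c3 u) (List.nodup_singleton _) ?_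
        intro x hx hx'
        simp at hx'
        subst hx'
        exact absurd (pvContains_of_mem _ _ hx) (by simp [hc])
    · exact c3 u
  · -- u not an inner key of its own row
    intro u
    rw [pvStepB_getD]
    split_ifs with hab h1 h2
    · exact c4 u
    · rw [PySem.Dict.keys_setdefault]
      split_ifs with hc
      · exact c4 u
      · intro hm
        rcases List.mem_append.mp hm with hm | hm
        · exact c4 u hm
        · simp at hm; subst h1; exact hab hm
    · rw [PySem.Dict.keys_setdefault]
      split_ifs with hc
      · exact c4 u
      · intro hm
        rcases List.mem_append.mp hm with hm | hm
        · exact c4 u hm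
        · simp at hm; subst h2; exact hab hm.symm
    · exact c4 u
  · -- inner keys are nodes
    intro u x hx
    rw [kB]
    rw [pvStepB_getD] at hx
    have base : ∀ {y : String}, y ∈ ad.keys → y ∈ PySem.Set.add (PySem.Set.add ad.keys sc.1) sc.2.1 := by
      intro y hy; simp [PySem.Set.mem_add, hy]
    split_ifs at hx with hab h1 h2
    · exact base (c5 u x hx)
    · rw [PySem.Dict.keys_setdefault] at hx
      split_ifs at hx with hc
      · exact base (c5 u x hx)
      · rcases List.mem_append.mp hx with hx | hx
        · exact base (c5 u x hx)
        · simp at hx; subst hx; simp [PySem.Set.mem_add]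
    · rw [PySem.Dict.keys_setdefault] at hx
      split_ifs at hx with hc
      · exact base (c5 u x hx)
      · rcases List.mem_append.mp hx with hx | hx
        · exact base (c5 u x hx)
        · simp at hx; subst hx; simp [PySem.Set.mem_add]
    · exact base (c5 u x hx)
  · -- the first-edge correspondence
    intro u x hxu
    rw [pvStepB_getD, pvStepA_getD]
    by_cases hab : sc.1 = sc.2.1
    · simp only [if_pos hab]
      by_cases h1 : u = sc.1
      · simp only [if_pos h1]
        rw [List.append_assoc, pvFirstMatchA_append]
        have : pvFirstMatchA x ([(sc.2.1, sc.2.2)] ++ [(sc.1, sc.2.2)]) = none := by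
          have hx1 : x ≠ sc.1 := by rw [← h1]; exact hxu
          have hx2 : x ≠ sc.2.1 := by rw [← hab]; exact hx1
          simp [pvFirstMatchA, hx1, hx2]
        rw [this]
        cases hm : pvFirstMatchA x (g.getD u []) <;> simp [c6 u x hxu, hm]
      · simp only [if_neg h1]; exact c6 u x hxu
    · simp only [if_neg hab]
      by_cases h1 : u = sc.1
      · simp only [if_pos h1]
        rw [pvFirstMatchA_append]
        by_cases hxb : x = sc.2.1
        · have hc := c6 u x hxu
          rw [hxb] at hc ⊢
          rw [PySem.Dict.get?_setdefault_self]
          cases hm : pvFirstMatchA sc.2.1 (g.getD u []) with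
          | none => simp [hm, pvFirstMatchA, hc]
          | some r => simp [hm, pvFirstMatchA, hc]
        · rw [PySem.Dict.get?_setdefault_of_ne _ _ hxb]
          cases hm : pvFirstMatchA x (g.getD u []) <;> simp [c6 u x hxu, hm, pvFirstMatchA, hxb]
      · by_cases h2 : u = sc.2.1
        · simp only [if_neg h1, if_pos h2]
          rw [pvFirstMatchA_append]
          by_cases hxa : x = sc.1
          · have hc := c6 u x hxu
            rw [hxa] at hc ⊢
            rw [PySem.Dict.get?_setdefault_self]
            cases hm : pvFirstMatchA sc.1 (g.getD u []) with
            | none => simp [hm, pvFirstMatchA, hc]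
            | some r => simp [hm, pvFirstMatchA, hc]
          · rw [PySem.Dict.get?_setdefault_of_ne _ _ hxa]
            cases hm : pvFirstMatchA x (g.getD u []) <;> simp [c6 u x hxu, hm, pvFirstMatchA, hxa]
        · simp only [if_neg h1, if_neg h2]; exact c6 u x hxu

lemma pvInv_fold (sch : List (String × String × Int)) :
    pvInv (sch.foldl pvStepA PySem.Dict.empty) (sch.foldl pvStepB PySem.Dict.empty) := by
  suffices h : ∀ (l : List (String × String × Int)) g ad, pvInv g ad →
      pvInv (l.foldl pvStepA g) (l.foldl pvStepB ad) by
    exact h sch _ _ pvInv_empty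
  intro l
  induction l with
  | nil => intro g ad h; exact h
  | cons sc t ih => intro g ad h; exact ih _ _ (pvInv_step g ad sc h)

-- keys of the B fold, as a fold of set-insertions
lemma pvFoldB_keys (sch : List (String × String × Int)) (ad : PySem.Dict String (PySem.Dict String Int)) :
    (sch.foldl pvStepB ad).keys =
      sch.foldl (fun k sc => PySem.Set.add (PySem.Set.add k sc.1) sc.2.1) ad.keys := by
  induction sch generalizing ad with
  | nil => rfl
  | cons sc t ih => simp only [List.foldl_cons, ih, pvStepB_keys]

lemma pvKeysFold_mono (sch : List (String × String × Int)) (k : List String) (x : String)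
    (h : x ∈ k) : x ∈ sch.foldl (fun k sc => PySem.Set.add (PySem.Set.add k sc.1) sc.2.1) k := by
  induction sch generalizing k with
  | nil => exact h
  | cons sc t ih => exact ih _ (by simp [PySem.Set.mem_add, h])

lemma pvKeysFold_endpoints (sch : List (String × String × Int)) (k : List String) :
    ∀ sc ∈ sch, sc.1 ∈ sch.foldl (fun k sc => PySem.Set.add (PySem.Set.add k sc.1) sc.2.1) k ∧
      sc.2.1 ∈ sch.foldl (fun k sc => PySem.Set.add (PySem.Set.add k sc.1) sc.2.1) k := by
  induction sch generalizing k with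
  | nil => intro sc h; simp at h
  | cons e t ih =>
      intro sc h
      rcases List.mem_cons.mp h with h | h
      · subst h
        exact ⟨pvKeysFold_mono t _ _ (by simp [PySem.Set.mem_add]),
          pvKeysFold_mono t _ _ (by simp [PySem.Set.mem_add])⟩
      · exact ih _ sc h

-- ===== association-list lookup plumbing =====
def pvLookup (x : String) : List (String × Int) → Option Int
  | [] => none
  | p :: t => if p.1 = x then some p.2 else pvLookup x t

lemma pvGet?_eq_pvLookup (d : PySem.Dict String Int) (x : String) :
    d.get? x = pvLookup x d.items := by
  obtain ⟨l⟩ := d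
  induction l with
  | nil => simp [PySem.Dict.get?.eq_1, pvLookup]
  | cons p t ih =>
      rw [show (⟨p :: t⟩ : PySem.Dict String Int) = ⟨(p.1, p.2) :: t⟩ from rfl,
        PySem.Dict.get?_mk_cons]
      by_cases h : p.1 = x <;> simp [pvLookup, h, ih]

-- ===== selection =====
lemma pvSelA_eq_filter (dist : PySem.Dict String Int) :
    ∀ (items : List (String × Bool)) (acc : String × Int),
      items.foldl (fun p cv =>
          if cv.2 = false ∧ dist.getD cv.1 0 < p.2 then (cv.1, dist.getD cv.1 0) else p) acc =
        ((items.filter (fun p => !p.2)).map (·.1)).foldl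
          (fun p c => if dist.getD c 0 < p.2 then (c, dist.getD c 0) else p) acc := by
  intro items
  induction items with
  | nil => intro acc; rfl
  | cons cv t ih =>
      intro acc
      by_cases hv : cv.2 = false
      · simp only [List.foldl_cons, List.filter_cons, hv, Bool.not_false, if_true, List.map_cons,
          true_and]
        rw [ih]
      · have hv' : cv.2 = true := by simpa using hv
        simp only [List.foldl_cons, List.filter_cons, hv', Bool.not_true, if_false,
          Bool.true_eq_false, false_and, if_false]
        exact ih acc

lemma pvSelS_mem (dist : PySem.Dict String Int) :
    ∀ (cs : List String) (acc : String × Int) (u : String),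
      (cs.foldl (fun p c => if dist.getD c 0 < p.2 then (c, dist.getD c 0) else p) acc).1 = u →
        acc.1 = u ∨ u ∈ cs := by
  intro cs
  induction cs with
  | nil => intro acc u h; exact Or.inl h
  | cons c t ih =>
      intro acc u h
      simp only [List.foldl_cons] at h
      by_cases hc : dist.getD c 0 < acc.2
      · rw [if_pos hc] at h
        rcases ih _ u h with h' | h'
        · exact Or.inr (by rw [← h']; exact List.mem_cons_self)
        · exact Or.inr (List.mem_cons_of_mem _ h')
      · rw [if_neg hc] at h
        rcases ih _ u h with h' | h'
        · exact Or.inl h'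
        · exact Or.inr (List.mem_cons_of_mem _ h')

-- ===== relaxation =====
-- the value of dist[x] after one relaxation round from u, pointwise
def pvAVal (gl : List (String × Int)) (u : String) (du dx : Int) (x : String) : Int :=
  match pvFirstMatchA x gl with
  | some r => if r.1 = u then dx else if du + r.2 < dx then du + r.2 else dx
  | none => dx

lemma pvStepRA_getD_self (graph : PySem.Dict String (List (String × Int))) (u : String) (cap : Int)
    (dist : PySem.Dict String Int) (g : String) :
    ((fun dist g =>
        let vw := (pvFirstMatchA g (graph.getD u [])).getD (u, cap)
        if vw.1 = u then dist
        else
          let newLen := dist.getD u 0 + vw.2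
          if newLen < dist.getD vw.1 0 then dist.insert vw.1 newLen else dist) dist g).getD g 0 =
      pvAVal (graph.getD u []) u (dist.getD u 0) (dist.getD g 0) g := by
  simp only [pvAVal]
  cases hm : pvFirstMatchA g (graph.getD u []) with
  | none => simp [hm]
  | some r =>
      have hr : r.1 = g := pvFirstMatchA_fst _ _ _ hm
      by_cases hu : r.1 = u
      · simp [hm, hu]
      · simp only [hm, Option.getD_some, if_neg hu]
        rw [hr]
        split_ifs with h
        · rw [PySem.Dict.getD_insert]; simp
        · rfl

lemma pvStepRA_getD_other (graph : PySem.Dict String (List (String × Int))) (u : String) (cap : Int)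
    (dist : PySem.Dict String Int) (g x : String) (hx : x ≠ g) :
    ((fun dist g =>
        let vw := (pvFirstMatchA g (graph.getD u [])).getD (u, cap)
        if vw.1 = u then dist
        else
          let newLen := dist.getD u 0 + vw.2
          if newLen < dist.getD vw.1 0 then dist.insert vw.1 newLen else dist) dist g).getD x 0 =
      dist.getD x 0 := by
  cases hm : pvFirstMatchA g (graph.getD u []) with
  | none => simp [hm]
  | some r =>
      have hr : r.1 = g := pvFirstMatchA_fst _ _ _ hm
      by_cases hu : r.1 = u
      · simp [hm, hu]
      · simp only [hm, Option.getD_some, if_neg hu]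
        split_ifs with h
        · rw [PySem.Dict.getD_insert, if_neg (hr ▸ hx)]
        · rfl

lemma pvStepRA_getD_u (graph : PySem.Dict String (List (String × Int))) (u : String) (cap : Int)
    (dist : PySem.Dict String Int) (g : String) :
    ((fun dist g =>
        let vw := (pvFirstMatchA g (graph.getD u [])).getD (u, cap)
        if vw.1 = u then dist
        else
          let newLen := dist.getD u 0 + vw.2
          if newLen < dist.getD vw.1 0 then dist.insert vw.1 newLen else dist) dist g).getD u 0 =
      dist.getD u 0 := by
  by_cases hg : u = g
  · subst hg
    rw [pvStepRA_getD_self]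
    simp only [pvAVal]
    cases hm : pvFirstMatchA u (graph.getD u []) with
    | none => rfl
    | some r => simp [pvFirstMatchA_fst _ _ _ hm]
  · exact pvStepRA_getD_other graph u cap dist g u hg

lemma pvRelaxA_getD (graph : PySem.Dict String (List (String × Int))) (u : String) (cap : Int) :
    ∀ (gs : List String) (dist : PySem.Dict String Int), gs.Nodup → ∀ x,
      (gs.foldl (fun dist g =>
          let vw := (pvFirstMatchA g (graph.getD u [])).getD (u, cap)
          if vw.1 = u then dist
          else
            let newLen := dist.getD u 0 + vw.2
            if newLen < dist.getD vw.1 0 then dist.insert vw.1 newLen else dist) dist).getD x 0 =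
        if x ∈ gs then pvAVal (graph.getD u []) u (dist.getD u 0) (dist.getD x 0) x
        else dist.getD x 0 := by
  intro gs
  induction gs with
  | nil => intro dist _ x; simp
  | cons g t ih =>
      intro dist hnd x
      have hnd' := hnd.of_cons
      have hgt : g ∉ t := (List.nodup_cons.mp hnd).1
      simp only [List.foldl_cons]
      rw [ih _ hnd' x]
      by_cases hxg : x = g
      · subst hxg
        rw [if_neg hgt, if_pos List.mem_cons_self]
        exact pvStepRA_getD_self graph u cap dist x
      · rw [pvStepRA_getD_other graph u cap dist g x hxg,
          pvStepRA_getD_u graph u cap dist g]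
        by_cases hxt : x ∈ t
        · rw [if_pos hxt, if_pos (List.mem_cons_of_mem _ hxt)]
        · rw [if_neg hxt, if_neg (by simp [hxg, hxt])]

lemma pvRelaxA_keys (graph : PySem.Dict String (List (String × Int))) (u : String) (cap : Int) :
    ∀ (gs : List String) (dist : PySem.Dict String Int), (∀ g ∈ gs, g ∈ dist.keys) →
      (gs.foldl (fun dist g =>
          let vw := (pvFirstMatchA g (graph.getD u [])).getD (u, cap)
          if vw.1 = u then dist
          else
            let newLen := dist.getD u 0 + vw.2
            if newLen < dist.getD vw.1 0 then dist.insert vw.1 newLen else dist) dist).keys =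
        dist.keys := by
  intro gs
  induction gs with
  | nil => intro dist _; rfl
  | cons g t ih =>
      intro dist hg
      simp only [List.foldl_cons]
      have hstep : ((fun dist g =>
          let vw := (pvFirstMatchA g (graph.getD u [])).getD (u, cap)
          if vw.1 = u then dist
          else
            let newLen := dist.getD u 0 + vw.2
            if newLen < dist.getD vw.1 0 then dist.insert vw.1 newLen else dist) dist g).keys = dist.keys := by
        cases hm : pvFirstMatchA g (graph.getD u []) with
        | none => simp [hm]
        | some r =>
            have hr : r.1 = g := pvFirstMatchA_fst _ _ _ hm
            by_cases hu : r.1 = u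
            · simp [hm, hu]
            · simp only [hm, Option.getD_some, if_neg hu]
              split_ifs with h
              · exact PySem.Dict.keys_insert_of_contains _ _
                  (pvContains_of_mem _ _ (hr ▸ hg g List.mem_cons_self))
              · rfl
      rw [ih _ (fun g' hg' => hstep ▸ hg g' (List.mem_cons_of_mem _ hg')), hstep]

-- B's relaxation: value of dist[x] after folding the first-edge items
def pvBVal (du dx : Int) (w? : Option Int) : Int :=
  match w? with
  | some w => if du + w < dx then du + w else dx
  | none => dx

lemma pvLookup_eq_none_of_not_mem (x : String) (t : List (String × Int))
    (h : x ∉ t.map (·.1)) : pvLookup x t = none := by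
  induction t with
  | nil => rfl
  | cons q s ih =>
      have hq : q.1 ≠ x := fun he => h (by simp [he])
      simp only [pvLookup, if_neg hq]
      exact ih (fun hm => h (List.mem_cons_of_mem _ hm))

lemma pvBVal_some (du dx w : Int) : pvBVal du dx (some w) = if du + w < dx then du + w else dx := rfl

lemma pvBVal_none (du dx : Int) : pvBVal du dx none = dx := rfl

lemma pvRelaxB_getD (du : Int) :
    ∀ (ps : List (String × Int)) (dist : PySem.Dict String Int), (ps.map (·.1)).Nodup → ∀ x,
      (ps.foldl (fun dist vw =>
          if du + vw.2 < dist.getD vw.1 0 then dist.insert vw.1 (du + vw.2) else dist) dist).getD x 0 =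
        pvBVal du (dist.getD x 0) (pvLookup x ps) := by
  intro ps
  induction ps with
  | nil => intro dist _ x; simp [pvBVal, pvLookup]
  | cons p t ih =>
      intro dist hnd x
      have hnd' : (t.map (·.1)).Nodup := (List.nodup_cons.mp (by simpa using hnd)).2
      have hpt : p.1 ∉ t.map (·.1) := (List.nodup_cons.mp (by simpa using hnd)).1
      simp only [List.foldl_cons]
      rw [ih _ hnd' x]
      have hstep_other : ∀ y, y ≠ p.1 →
          ((if du + p.2 < dist.getD p.1 0 then dist.insert p.1 (du + p.2) else dist) : PySem.Dict String Int).getD y 0 = dist.getD y 0 := by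
        intro y hy
        split_ifs with h
        · rw [PySem.Dict.getD_insert, if_neg hy]
        · rfl
      by_cases hxp : x = p.1
      · subst hxp
        rw [pvLookup_eq_none_of_not_mem _ _ hpt, pvBVal_none]
        simp only [pvLookup, if_pos rfl, pvBVal_some]
        split_ifs with h
        · rw [PySem.Dict.getD_insert]; simp [pvBVal_some, h]
        · rw [pvBVal_some, if_neg h]
      · rw [hstep_other x hxp]
        simp only [pvLookup, if_neg (fun he : p.1 = x => hxp he.symm)]

lemma pvRelaxB_keys (du : Int) :
    ∀ (ps : List (String × Int)) (dist : PySem.Dict String Int), (∀ p ∈ ps, p.1 ∈ dist.keys) →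
      (ps.foldl (fun dist vw =>
          if du + vw.2 < dist.getD vw.1 0 then dist.insert vw.1 (du + vw.2) else dist) dist).keys =
        dist.keys := by
  intro ps
  induction ps with
  | nil => intro dist _; rfl
  | cons p t ih =>
      intro dist hp
      simp only [List.foldl_cons]
      have hstep : ((if du + p.2 < dist.getD p.1 0 then dist.insert p.1 (du + p.2) else dist) : PySem.Dict String Int).keys = dist.keys := by
        split_ifs with h
        · exact PySem.Dict.keys_insert_of_contains _ _
            (pvContains_of_mem _ _ (hp p List.mem_cons_self))
        · rfl
      rw [ih _ (fun q hq => hstep ▸ hp q (List.mem_cons_of_mem _ hq)), hstep]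

-- one relaxation round is the same dict on both sides
lemma pvRelax_eq (graph : PySem.Dict String (List (String × Int)))
    (adj : PySem.Dict String (PySem.Dict String Int)) (hInv : pvInv graph adj)
    (u : String) (cap : Int) (dist : PySem.Dict String Int) (hk : dist.keys = adj.keys) :
    pvRelaxA graph u cap dist =
      (adj.getD u PySem.Dict.empty).items.foldl (fun d vw =>
        if dist.getD u 0 + vw.2 < d.getD vw.1 0 then d.insert vw.1 (dist.getD u 0 + vw.2) else d) dist := by
  obtain ⟨c1, c2, c3, c4, c5, c6⟩ := hInv
  have hfst : ((adj.getD u PySem.Dict.empty).items.map (·.1)).Nodup := by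
    have := c3 u; rwa [PySem.Dict.keys.eq_1] at this
  have hAkeys : (pvRelaxA graph u cap dist).keys = dist.keys := by
    apply pvRelaxA_keys
    intro g hg; rw [hk, ← c1]; exact hg
  have hBkeys : ((adj.getD u PySem.Dict.empty).items.foldl (fun d vw =>
      if dist.getD u 0 + vw.2 < d.getD vw.1 0 then d.insert vw.1 (dist.getD u 0 + vw.2) else d) dist).keys = dist.keys := by
    apply pvRelaxB_keys
    intro p hp
    rw [hk]
    exact c5 u p.1 (by rw [PySem.Dict.keys.eq_1]; exact List.mem_map_of_mem hp)
  have hknd : dist.keys.Nodup := by rw [hk]; exact c2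
  apply PySem.Dict.ext
  rw [PySem.Dict.items_eq_map_keys _ (by rw [hAkeys]; exact hknd) 0,
    PySem.Dict.items_eq_map_keys _ (by rw [hBkeys]; exact hknd) 0, hAkeys, hBkeys]
  apply List.map_congr_left
  intro x hx
  have hA := pvRelaxA_getD graph u cap graph.keys dist (by rw [c1]; exact c2) x
  have hB := pvRelaxB_getD (dist.getD u 0) (adj.getD u PySem.Dict.empty).items dist hfst x
  rw [show pvRelaxA graph u cap dist = graph.keys.foldl (fun dist g =>
      let vw := (pvFirstMatchA g (graph.getD u [])).getD (u, cap)
      if vw.1 = u then dist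
      else
        let newLen := dist.getD u 0 + vw.2
        if newLen < dist.getD vw.1 0 then dist.insert vw.1 newLen else dist) dist from rfl, hA, hB]
  rw [if_pos (by rw [c1]; rw [hk] at hx; exact hx)]
  rw [← pvGet?_eq_pvLookup]
  by_cases hxu : x = u
  · subst hxu
    have hnone : (adj.getD x PySem.Dict.empty).get? x = none := by
      rw [PySem.Dict.get?_eq_none_iff_not_mem_keys]; exact c4 x
    rw [hnone, pvBVal_none]
    simp only [pvAVal]
    cases hm : pvFirstMatchA x (graph.getD x []) with
    | none => rfl
    | some r => simp [pvFirstMatchA_fst _ _ _ hm]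
  · rw [c6 u x hxu]
    simp only [pvAVal]
    cases hm : pvFirstMatchA x (graph.getD u []) with
    | none => rfl
    | some r =>
        have hr : r.1 = x := pvFirstMatchA_fst _ _ _ hm
        simp only [Option.map_some, pvBVal_some]
        simp [hr, hxu]

-- marking u visited updates the unvisited list by filtering u out
lemma pvRem_step (visited : PySem.Dict String Bool) (u : String) (hc : u ∈ visited.keys) :
    ((visited.insert u true).items.filter (fun p => !p.2)).map (·.1) =
      (((visited.items.filter (fun p => !p.2)).map (·.1)).filter (fun c => c ≠ u)) := by
  rw [PySem.Dict.items_insert_of_contains _ _ (pvContains_of_mem _ _ hc)]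
  induction visited.items with
  | nil => rfl
  | cons p t ih =>
      simp only [List.map_cons, List.filter_cons]
      by_cases hpu : p.1 = u <;> by_cases hp2 : p.2 = false <;>
        simp [hpu, hp2, ih] <;> simp_all

-- the two main loops agree step for step
lemma pvLoop_eq (graph : PySem.Dict String (List (String × Int)))
    (adj : PySem.Dict String (PySem.Dict String Int)) (hInv : pvInv graph adj) (cap : Int) :
    ∀ (fuel : Nat) (dist : PySem.Dict String Int) (visited : PySem.Dict String Bool),
      dist.keys = adj.keys → visited.keys = adj.keys →
      pvLoopA graph cap fuel dist visited =
        pvLoopB adj cap fuel dist ((visited.items.filter (fun p => !p.2)).map (·.1)) := by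
  intro fuel
  induction fuel with
  | zero => intro dist visited _ _; rfl
  | succ n ih =>
      intro dist visited hdk hvk
      have hsel : pvSelectA dist cap visited.items =
          pvSelectB dist cap ((visited.items.filter (fun p => !p.2)).map (·.1)) := by
        rw [pvSelectA, pvSelectB, pvSelA_eq_filter]
      by_cases hu : (pvSelectB dist cap ((visited.items.filter (fun p => !p.2)).map (·.1))).1 = ""
      · simp only [pvLoopA, pvLoopB, hsel]
        rw [if_pos hu, if_pos hu]
      · have hurem : (pvSelectB dist cap ((visited.items.filter (fun p => !p.2)).map (·.1))).1 ∈
            (visited.items.filter (fun p => !p.2)).map (·.1) := by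
          rcases pvSelS_mem dist _ ("", cap) _ rfl with h | h
          · exact absurd h.symm hu
          · exact h
        have huk : (pvSelectB dist cap ((visited.items.filter (fun p => !p.2)).map (·.1))).1 ∈ visited.keys := by
          rcases List.mem_map.mp hurem with ⟨p, hp, hpe⟩
          rw [PySem.Dict.keys.eq_1]
          exact hpe ▸ List.mem_map_of_mem (List.mem_of_mem_filter hp)
        have hrx := pvRelax_eq graph adj hInv
          (pvSelectB dist cap ((visited.items.filter (fun p => !p.2)).map (·.1))).1 cap dist hdk
        have hdk' : (pvRelaxA graph
            (pvSelectB dist cap ((visited.items.filter (fun p => !p.2)).map (·.1))).1 cap dist).keys = adj.keys := by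
          rw [pvRelaxA]
          rw [pvRelaxA_keys graph _ cap graph.keys dist
            (fun g hg => by rw [hdk, ← hInv.1]; exact hg)]
          exact hdk
        have hvk' : (visited.insert
            (pvSelectB dist cap ((visited.items.filter (fun p => !p.2)).map (·.1))).1 true).keys = adj.keys := by
          rw [PySem.Dict.keys_insert_of_contains _ _ (pvContains_of_mem _ _ huk)]
          exact hvk
        have hrem' := pvRem_step visited
          (pvSelectB dist cap ((visited.items.filter (fun p => !p.2)).map (·.1))).1 huk
        simp only [pvLoopA, pvLoopB, hsel]
        rw [if_neg hu, if_neg hu]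
        rw [ih _ _ hdk' hvk', hrem', hrx]

-- one schedule edge: A's capped search agrees with B's
lemma pvFind_eq (schedule : List (String × String × Int)) :
    ∀ sc ∈ schedule,
      decide (find_lower_cost (schedule.foldl pvStepA PySem.Dict.empty) sc < sc.2.2) =
        pvCheaperB (schedule.foldl pvStepB PySem.Dict.empty)
          (schedule.foldl pvStepB PySem.Dict.empty).keys sc.1 sc.2.1 sc.2.2 := by
  intro sc hsc
  have hInv := pvInv_fold schedule
  have c1 : (schedule.foldl pvStepA PySem.Dict.empty).keys =
      (schedule.foldl pvStepB PySem.Dict.empty).keys := hInv.1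
  have c2 : (schedule.foldl pvStepB PySem.Dict.empty).keys.Nodup := hInv.2.1
  have hsc1 : sc.1 ∈ (schedule.foldl pvStepB PySem.Dict.empty).keys := by
    rw [pvFoldB_keys]
    exact (pvKeysFold_endpoints schedule PySem.Dict.empty.keys sc hsc).1
  have hvitems : ((schedule.foldl pvStepA PySem.Dict.empty).keys.foldl
      (fun d a => d.insert a false) (PySem.Dict.empty : PySem.Dict String Bool)).items =
      (schedule.foldl pvStepB PySem.Dict.empty).keys.map (fun x => (x, false)) := by
    rw [c1]
    have := PySem.Dict.items_foldl_insert_fresh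
      ((schedule.foldl pvStepB PySem.Dict.empty).keys) (fun a => a) (fun _ => false)
      (PySem.Dict.empty : PySem.Dict String Bool)
      (fun a _ => PySem.Dict.contains_empty a) (by simpa using c2)
    simpa using this
  have hditems : ((schedule.foldl pvStepA PySem.Dict.empty).keys.foldl
      (fun d a => d.insert a sc.2.2) (PySem.Dict.empty : PySem.Dict String Int)).items =
      (schedule.foldl pvStepB PySem.Dict.empty).keys.map (fun x => (x, sc.2.2)) := by
    rw [c1]
    have := PySem.Dict.items_foldl_insert_fresh
      ((schedule.foldl pvStepB PySem.Dict.empty).keys) (fun a => a) (fun _ => sc.2.2)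
      (PySem.Dict.empty : PySem.Dict String Int)
      (fun a _ => PySem.Dict.contains_empty a) (by simpa using c2)
    simpa using this
  have hvkeys : ((schedule.foldl pvStepA PySem.Dict.empty).keys.foldl
      (fun d a => d.insert a false) (PySem.Dict.empty : PySem.Dict String Bool)).keys =
      (schedule.foldl pvStepB PySem.Dict.empty).keys := by
    rw [PySem.Dict.keys.eq_1, hvitems, List.map_map]
    rw [show ((fun (x : String × Bool) => x.1) ∘ fun (x : String) => (x, false)) = id from rfl,
      List.map_id]
  have hdkeys : (((schedule.foldl pvStepA PySem.Dict.empty).keys.foldl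
      (fun d a => d.insert a sc.2.2) (PySem.Dict.empty : PySem.Dict String Int)).insert sc.1 0).keys =
      (schedule.foldl pvStepB PySem.Dict.empty).keys := by
    have hk0 : ((schedule.foldl pvStepA PySem.Dict.empty).keys.foldl
        (fun d a => d.insert a sc.2.2) (PySem.Dict.empty : PySem.Dict String Int)).keys =
        (schedule.foldl pvStepB PySem.Dict.empty).keys := by
      rw [PySem.Dict.keys.eq_1, hditems, List.map_map]
      rw [show ((fun (x : String × Int) => x.1) ∘ fun (x : String) => (x, sc.2.2)) = id from rfl,
        List.map_id]
    rw [PySem.Dict.keys_insert_of_contains _ _ (pvContains_of_mem _ _ (hk0 ▸ hsc1))]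
    exact hk0
  have hrem0 : (((( schedule.foldl pvStepA PySem.Dict.empty).keys.foldl
      (fun d a => d.insert a false) (PySem.Dict.empty : PySem.Dict String Bool)).items.filter
        (fun p => !p.2)).map (·.1)) = (schedule.foldl pvStepB PySem.Dict.empty).keys := by
    rw [hvitems, List.filter_map]
    simp only [Function.comp_def, Bool.not_false, List.filter_true, List.map_map]
    exact List.map_id' _
  have hloop := pvLoop_eq (schedule.foldl pvStepA PySem.Dict.empty)
    (schedule.foldl pvStepB PySem.Dict.empty) hInv sc.2.2
    ((schedule.foldl pvStepA PySem.Dict.empty).keys.length + 1)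
    ((( schedule.foldl pvStepA PySem.Dict.empty).keys.foldl
      (fun d a => d.insert a sc.2.2) (PySem.Dict.empty : PySem.Dict String Int)).insert sc.1 0)
    ((schedule.foldl pvStepA PySem.Dict.empty).keys.foldl
      (fun d a => d.insert a false) (PySem.Dict.empty : PySem.Dict String Bool))
    hdkeys hvkeys
  rw [hrem0] at hloop
  show decide ((pvLoopA (schedule.foldl pvStepA PySem.Dict.empty) sc.2.2
      ((schedule.foldl pvStepA PySem.Dict.empty).keys.length + 1) _ _).getD sc.2.1 0 < sc.2.2) = _
  rw [hloop, pvCheaperB]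
  rw [show ((schedule.foldl pvStepA PySem.Dict.empty).keys.length + 1) =
    ((schedule.foldl pvStepB PySem.Dict.empty).keys.length + 1) from by rw [c1], c1]

-- the cached output loop appends exactly the indices whose (src, dst, cost) triple tests true
lemma pvCache_fold (F : (String × String × Int) → Bool) :
    ∀ (l : List (Int × (String × String × Int)))
      (cache : PySem.Dict (String × String × Int) Bool) (out : List Int),
      (∀ k v, cache.get? k = some v → v = F k) →
      (l.foldl (fun (st : PySem.Dict (String × String × Int) Bool × List Int) p =>
          let c := if st.1.contains p.2 then st.1 else st.1.insert p.2 (F p.2)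
          (c, if c.getD p.2 false then st.2 ++ [p.1] else st.2)) (cache, out)).2 =
        out ++ (l.filter (fun p => F p.2)).map (·.1) := by
  intro l
  induction l with
  | nil => intro cache out _; simp
  | cons p t ih =>
      intro cache out hc
      simp only [List.foldl_cons, List.filter_cons]
      by_cases hcon : cache.contains p.2
      · obtain ⟨v, hv⟩ : ∃ v, cache.get? p.2 = some v := by
          have := PySem.Dict.contains_eq_isSome_get? cache p.2
          rw [hcon] at this
          exact Option.isSome_iff_exists.mp this.symm
        have hval : cache.getD p.2 false = F p.2 := by
          rw [PySem.Dict.getD_eq_get?_getD, hv]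
          exact hc p.2 v hv
        simp only [hcon, if_true]
        rw [ih cache _ hc, hval]
        cases hF : F p.2 <;> simp [hF]
      · have hcon' : cache.contains p.2 = false := by simpa using hcon
        have hval : (cache.insert p.2 (F p.2)).getD p.2 false = F p.2 := by
          rw [PySem.Dict.getD_insert]; simp
        have hc' : ∀ k v, (cache.insert p.2 (F p.2)).get? k = some v → v = F k := by
          intro k v hkv
          rw [PySem.Dict.get?_insert] at hkv
          split_ifs at hkv with hk
          · subst hk; exact (Option.some_inj.mp hkv).symm
          · exact hc k v hkv
        simp only [hcon', Bool.false_eq_true, if_false]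
        rw [ih _ _ hc', hval]
        cases hF : F p.2 <;> simp [hF]

-- ===== VERDICT =====
theorem useless_flight_spec : Claim_equal_useless_flight := by
  intro schedule _hdom
  unfold Spec_useless_flight
  rw [pvUF_eq]
  have hB := pvCache_fold
    (fun k => pvCheaperB (schedule.foldl pvStepB PySem.Dict.empty)
      (schedule.foldl pvStepB PySem.Dict.empty).keys k.1 k.2.1 k.2.2)
    (PySem.List.enumerate schedule 0) PySem.Dict.empty []
    (fun k v hv => by rw [PySem.Dict.get?_empty] at hv; cases hv)
  have hBeq : useless_flight_alt schedule =
      [] ++ ((PySem.List.enumerate schedule 0).filter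
        (fun p => pvCheaperB (schedule.foldl pvStepB PySem.Dict.empty)
          (schedule.foldl pvStepB PySem.Dict.empty).keys p.2.1 p.2.2.1 p.2.2.2)).map (·.1) := hB
  rw [hBeq, List.nil_append]
  congr 1
  apply List.filter_congr
  intro p hp
  have hmem : p.2 ∈ schedule := by
    rcases (PySem.List.mem_enumerate_iff schedule 0 p).mp hp with ⟨k, hk, hpe⟩
    rw [hpe]
    exact List.getElem_mem hk
  exact pvFind_eq schedule p.2 hmem
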